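-- pv_equiv track=rewrite | github.com/mcjczapiewski/game_inventory | game_inventory.py | remove_from_inventory
-- ===== SOURCE A (Python) =====
-- def remove_from_inventory(inventory, removed_items):
--     """Remove from the inventory dictionary a list of items from removed_items."""
--     removed_items = make_it_a_list(removed_items)
--     for item in removed_items:
--         if item in inventory:
--             inventory[item] = inventory[item] - 1
--             if inventory[item] < 1:
--                 del inventory[item]
--     return inventory
--
-- def make_it_a_list(single_item_string):
--     if type(single_item_string) is not list:
--         single_item_string = [single_item_string]
--     return single_item_string
-- ===== SOURCE B (Python) =====
-- def remove_from_inventory(inventory, removed_items):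
--     """Remove from the inventory dictionary a list of items from removed_items.
--     Return-value equivalent to the original; builds a fresh dict instead of
--     mutating inventory in place."""
--     if type(removed_items) is not list:
--         removed_items = [removed_items]
--     counts = {}
--     for item in removed_items:
--         counts[item] = counts.get(item, 0) + 1
--     result = {}
--     for item, amount in inventory.items():
--         taken = counts.get(item, 0)
--         if taken == 0:
--             result[item] = amount
--         elif amount - taken >= 1:
--             result[item] = amount - taken
--     return result
-- ===== Notes on version B (the rewrite author's own statement) =====
-- stated objective: alternative
-- what changed: B traverses the inventory (not removed_items): it first tallies removed_items into a counts dict, then for each inventory entry keeps, rewrites or drops it in one step into a fresh result dict; equivalence is about the return value only (A mutates the passed dict in place, B builds a new one). Pre_ excludes inventory association lists with duplicate keys, which do not arise from a Python dict.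
import Mathlib
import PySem

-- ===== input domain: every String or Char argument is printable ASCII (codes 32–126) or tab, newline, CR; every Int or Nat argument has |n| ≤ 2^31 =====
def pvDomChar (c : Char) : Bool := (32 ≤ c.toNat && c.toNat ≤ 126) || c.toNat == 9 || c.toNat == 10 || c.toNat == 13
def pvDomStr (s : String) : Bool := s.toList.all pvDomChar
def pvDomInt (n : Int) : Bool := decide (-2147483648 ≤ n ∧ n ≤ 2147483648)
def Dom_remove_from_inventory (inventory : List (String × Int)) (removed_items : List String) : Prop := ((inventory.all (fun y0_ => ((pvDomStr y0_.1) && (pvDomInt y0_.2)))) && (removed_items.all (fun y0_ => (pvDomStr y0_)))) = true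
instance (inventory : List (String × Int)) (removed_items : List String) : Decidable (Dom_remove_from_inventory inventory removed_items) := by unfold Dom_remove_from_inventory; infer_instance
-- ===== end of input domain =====

-- B traverses the inventory instead of removed_items, tallying removed_items once and applying
-- each key's total removal count in one step into a fresh dict (objective: alternative);
-- return-value equivalence only — A mutates the passed dict in place, B builds a new one.

-- ===== PORT A =====
-- removed_items arrives as a list, so make_it_a_list is the identity here.
def remove_from_inventory (inventory : List (String × Int)) (removed_items : List String) : List (String × Int) :=
  (removed_items.foldl (fun d item =>
      if d.contains item then
        let d' := d.insert item (d.getD item 0 - 1)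
        if d'.getD item 0 < 1 then d'.erase item else d'
      else d)
    (PySem.Dict.mk inventory)).items

-- ===== PORT B =====
def remove_from_inventory_alt (inventory : List (String × Int)) (removed_items : List String) : List (String × Int) :=
  let counts := removed_items.foldl (fun d item => d.modify item 0 (· + 1)) PySem.Dict.empty
  (inventory.foldl (fun result p =>
      let taken : Int := counts.getD p.1 0
      if taken = 0 then result.insert p.1 p.2
      else if 1 ≤ p.2 - taken then result.insert p.1 (p.2 - taken)
      else result)
    PySem.Dict.empty).items

-- ===== PRECONDITION & SPEC =====
-- Pre_ excludes inventory association lists with duplicate keys: such a list does not arise from a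
-- Python dict (dict construction collapses duplicates), so no first-match reading of it is canonical.
def Pre_remove_from_inventory (inventory : List (String × Int)) (removed_items : List String) : Prop :=
  (inventory.map Prod.fst).Nodup
instance (inventory : List (String × Int)) (removed_items : List String) : Decidable (Pre_remove_from_inventory inventory removed_items) := by unfold Pre_remove_from_inventory; infer_instance
def pvWitness_remove_from_inventory : (List (String × Int)) × List String :=
  ([("sword", 2), ("shield", 1)], ["sword", "shield", "sword"])

def Spec_remove_from_inventory (inventory : List (String × Int)) (removed_items : List String) (out : List (String × Int)) : Prop := out = remove_from_inventory_alt inventory removed_items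
instance (inventory : List (String × Int)) (removed_items : List String) (out : List (String × Int)) : Decidable (Spec_remove_from_inventory inventory removed_items out) := by unfold Spec_remove_from_inventory; infer_instance

-- ===== CLAIM (what is proved, stated in full; the proofs are below) =====
def Claim_equal_remove_from_inventory : Prop := ∀ (inventory : List (String × Int)) (removed_items : List String), Dom_remove_from_inventory inventory removed_items → Pre_remove_from_inventory inventory removed_items → Spec_remove_from_inventory inventory removed_items (remove_from_inventory inventory removed_items)

-- ===== LEMMAS AND PROOFS =====

-- the effect of one of A's decrement-or-delete steps at key x, as an entrywise filterMap
def pvFilt (x : String) (c : Int) (p : String × Int) : Option (String × Int) :=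
  if p.1 = x then (if p.2 - c < 1 then none else some (x, p.2 - c)) else some p

-- the combined effect of processing the whole removed list l
def pvF (l : List String) (p : String × Int) : Option (String × Int) :=
  if (l.count p.1 : Int) = 0 ∨ 1 ≤ p.2 - (l.count p.1 : Int) then some (p.1, p.2 - (l.count p.1 : Int)) else none

theorem pv_key_unique {L : List (String × Int)} (hnd : (L.map Prod.fst).Nodup)
    {p q : String × Int} (hp : p ∈ L) (hq : q ∈ L) (h : p.1 = q.1) : p = q := by
  induction L with
  | nil => cases hp
  | cons a L ih =>
    simp only [List.map_cons, List.nodup_cons] at hnd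
    rcases List.mem_cons.mp hp with rfl | hp' <;> rcases List.mem_cons.mp hq with rfl | hq'
    · rfl
    · exact absurd (h ▸ List.mem_map_of_mem hq') hnd.1
    · exact absurd (h ▸ List.mem_map_of_mem hp') hnd.1
    · exact ih hnd.2 hp' hq'

theorem pv_filterMap_filt_sublist (L : List (String × Int)) (x : String) (c : Int) :
    ((L.filterMap (pvFilt x c)).map Prod.fst).Sublist (L.map Prod.fst) := by
  induction L with
  | nil => simp
  | cons p L ih =>
    by_cases hx : p.1 = x
    · by_cases hlt : p.2 - c < 1
      · simpa [pvFilt, hx, hlt] using ih.cons p.1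
      · simpa [pvFilt, hx, hlt] using ih.cons₂ p.1
    · simpa [pvFilt, hx] using ih.cons₂ p.1

theorem pv_nodup_filt {L : List (String × Int)} (hnd : (L.map Prod.fst).Nodup) (x : String) (c : Int) :
    ((L.filterMap (pvFilt x c)).map Prod.fst).Nodup :=
  hnd.sublist (pv_filterMap_filt_sublist L x c)

theorem pv_filter_eq {L : List (String × Int)} {x : String} {v c : Int}
    (hmem : ∀ p ∈ L, p.1 = x → p = (x, v)) (hlt : v - c < 1) :
    L.filter (fun p => !(p.1 == x)) = L.filterMap (pvFilt x c) := by
  induction L with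
  | nil => rfl
  | cons p L ih =>
    have ih' := ih (fun q hq => hmem q (List.mem_cons_of_mem p hq))
    by_cases hx : p.1 = x
    · have hp : p = (x, v) := hmem p (List.mem_cons_self ..) hx
      subst hp
      have hf : pvFilt x c (x, v) = none := by simp [pvFilt, hlt]
      simp [List.filter_cons, List.filterMap_cons, hf, ih']
    · have hf : pvFilt x c p = some p := by simp [pvFilt, hx]
      simp [List.filter_cons, List.filterMap_cons, hf, hx, ih']

theorem pv_map_eq {L : List (String × Int)} {x : String} {v c : Int}
    (hmem : ∀ p ∈ L, p.1 = x → p = (x, v)) (hge : ¬ v - c < 1) :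
    L.map (fun p => if p.1 == x then (x, v - c) else p) = L.filterMap (pvFilt x c) := by
  induction L with
  | nil => rfl
  | cons p L ih =>
    have ih' := ih (fun q hq => hmem q (List.mem_cons_of_mem p hq))
    by_cases hx : p.1 = x
    · have hp : p = (x, v) := hmem p (List.mem_cons_self ..) hx
      subst hp
      have hf : pvFilt x c (x, v) = some (x, v - c) := by simp [pvFilt, hge]
      rw [List.map_cons, if_pos (by simp : (((x, v) : String × Int).1 == x) = true),
        List.filterMap_cons_some hf]
      exact congrArg (List.cons (x, v - c)) ih'
    · have hf : pvFilt x c p = some p := by simp [pvFilt, hx]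
      rw [List.map_cons, if_neg (by simp [hx] : ¬ (p.1 == x) = true),
        List.filterMap_cons_some hf]
      exact congrArg (List.cons p) ih'

theorem pv_mapfilter_eq (L : List (String × Int)) (x : String) (w : Int) :
    (L.map (fun p => if p.1 == x then (x, w) else p)).filter (fun p => !(p.1 == x)) =
      L.filter (fun p => !(p.1 == x)) := by
  induction L with
  | nil => rfl
  | cons p L ih =>
    by_cases hx : p.1 = x
    · rw [List.map_cons, if_pos (by simp [hx] : (p.1 == x) = true),
        List.filter_cons_of_neg (p := fun p => !p.1 == x) (a := ((x, w) : String × Int)) (by simp),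
        List.filter_cons_of_neg (p := fun p => !p.1 == x) (a := p) (by simp [hx])]
      exact ih
    · rw [List.map_cons, if_neg (by simp [hx] : ¬ (p.1 == x) = true),
        List.filter_cons_of_pos (p := fun p => !p.1 == x) (a := p) (by simp [hx]),
        List.filter_cons_of_pos (p := fun p => !p.1 == x) (a := p) (by simp [hx])]
      exact congrArg (List.cons p) ih

theorem pv_contains_key {d : PySem.Dict String Int} {x : String}
    (hc : d.contains x = true) :
    ∃ v, d.get? x = some v ∧ d.getD x 0 = v ∧ (x, v) ∈ d.items := by
  have h1 : (d.get? x).isSome := by rw [← PySem.Dict.contains_eq_isSome_get?]; exact hc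
  obtain ⟨v, hv⟩ := Option.isSome_iff_exists.mp h1
  exact ⟨v, hv, by simp [PySem.Dict.getD, hv], PySem.Dict.mem_items_of_get?_eq_some d hv⟩

theorem pv_not_contains_key {d : PySem.Dict String Int} {x : String}
    (hc : ¬ d.contains x = true) : ∀ p ∈ d.items, p.1 ≠ x := by
  intro p hp h
  exact hc (List.any_eq_true.mpr ⟨p, hp, by simp [h]⟩)

-- one A-shaped step (insert then maybe erase) acts as pvFilt on the items
theorem pv_stepA_items (d : PySem.Dict String Int) (hnd : (d.items.map Prod.fst).Nodup) (x : String) (c : Int) :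
    (if d.contains x then
        let d' := d.insert x (d.getD x 0 - c)
        if d'.getD x 0 < 1 then d'.erase x else d'
      else d).items = d.items.filterMap (pvFilt x c) := by
  by_cases hc : d.contains x
  · obtain ⟨v, hget, hgetD, hmemv⟩ := pv_contains_key hc
    have hmem : ∀ p ∈ d.items, p.1 = x → p = (x, v) :=
      fun p hp h => pv_key_unique hnd hp hmemv h
    have hins : (d.insert x (d.getD x 0 - c)).getD x 0 = v - c := by
      rw [PySem.Dict.getD_insert_self, hgetD]
    have hitems : (d.insert x (d.getD x 0 - c)).items =
        d.items.map (fun p => if p.1 == x then (x, v - c) else p) := by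
      rw [hgetD]; exact PySem.Dict.items_insert_of_contains d _ hc
    by_cases hlt : v - c < 1
    · simp only [hc, if_true, hins, hlt, ite_true, ite_false]
      show ((d.insert x (d.getD x 0 - c)).items.filter (fun p => !(p.1 == x))) = _
      rw [hitems, pv_mapfilter_eq, pv_filter_eq hmem hlt]
    · simp only [hc, if_true, hins, hlt, ite_true, ite_false]
      rw [hitems, pv_map_eq hmem hlt]
  · have hkey := pv_not_contains_key hc
    simp only [hc]
    simp only [Bool.false_eq_true, if_false]
    symm
    calc d.items.filterMap (pvFilt x c)
        = d.items.filterMap some :=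
          List.filterMap_congr (fun p hp => by simp [pvFilt, hkey p hp])
      _ = d.items := List.filterMap_some

theorem pv_bind_stepA (x : String) (xs : List String) (p : String × Int) :
    (pvFilt x 1 p).bind (pvF xs) = pvF (x :: xs) p := by
  obtain ⟨k, v⟩ := p
  by_cases hx : k = x
  · subst hx
    have hn : (0 : Int) ≤ (xs.count k : Int) := Int.natCast_nonneg _
    simp only [pvFilt, pvF, if_pos rfl, List.count_cons_self]
    push_cast
    split_ifs <;> simp_all [Option.bind] <;> omega
  · simp only [pvFilt, pvF, if_neg hx]
    have hcnt : (x :: xs).count k = xs.count k := by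
      simp [List.count_cons, Ne.symm hx]
    simp [hcnt]

theorem pv_foldA (l : List String) : ∀ (d : PySem.Dict String Int), (d.items.map Prod.fst).Nodup →
    (l.foldl (fun d item =>
      if d.contains item then
        let d' := d.insert item (d.getD item 0 - 1)
        if d'.getD item 0 < 1 then d'.erase item else d'
      else d) d).items = d.items.filterMap (pvF l) := by
  induction l with
  | nil =>
    intro d _
    simp only [List.foldl_nil]
    symm
    calc d.items.filterMap (pvF [])
        = d.items.filterMap some := List.filterMap_congr (fun p _ => by simp [pvF])
      _ = d.items := List.filterMap_some
  | cons x xs ih =>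
    intro d hnd
    rw [List.foldl_cons]
    have hstep := pv_stepA_items d hnd x 1
    have hnd' : ((if d.contains x then
          let d' := d.insert x (d.getD x 0 - 1)
          if d'.getD x 0 < 1 then d'.erase x else d'
        else d).items.map Prod.fst).Nodup := by
      rw [hstep]; exact pv_nodup_filt hnd x 1
    rw [ih _ hnd', hstep, List.filterMap_filterMap]
    exact List.filterMap_congr (fun p _ => pv_bind_stepA x xs p)

-- B's accumulator loop over the inventory produces exactly the pvF-filterMap of the inventory
theorem pv_foldB (l : List String) (inv : List (String × Int)) :
    ∀ (r : PySem.Dict String Int), (inv.map Prod.fst).Nodup →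
    (∀ q ∈ inv, r.contains q.1 = false) →
    (inv.foldl (fun result p =>
        let taken : Int := l.count p.1
        if taken = 0 then result.insert p.1 p.2
        else if 1 ≤ p.2 - taken then result.insert p.1 (p.2 - taken)
        else result) r).items = r.items ++ inv.filterMap (pvF l) := by
  induction inv with
  | nil => intro r _ _; simp
  | cons p inv ih =>
    intro r hnd hfresh
    simp only [List.map_cons, List.nodup_cons] at hnd
    have hpc : r.contains p.1 = false := hfresh p (List.mem_cons_self ..)
    have htail : ∀ q ∈ inv, r.contains q.1 = false :=
      fun q hq => hfresh q (List.mem_cons_of_mem p hq)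
    have hfresh' : ∀ w, ∀ q ∈ inv, (r.insert p.1 w).contains q.1 = false := by
      intro w q hq
      rw [PySem.Dict.contains_insert]
      have hne : q.1 ≠ p.1 := fun h => hnd.1 (h ▸ List.mem_map_of_mem hq)
      simp [hne, htail q hq]
    rw [List.foldl_cons]
    by_cases h0 : (l.count p.1 : Int) = 0
    · have hins : (r.insert p.1 p.2).items = r.items ++ [(p.1, p.2)] :=
        PySem.Dict.items_insert_of_not_contains r _ (by simp [hpc])
      have hf : pvF l p = some (p.1, p.2) := by
        simp [pvF, h0]
      rw [if_pos h0, ih _ hnd.2 (hfresh' p.2), hins, List.filterMap_cons_some hf,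
        List.append_assoc, List.singleton_append]
    · by_cases h1 : 1 ≤ p.2 - (l.count p.1 : Int)
      · have hins : (r.insert p.1 (p.2 - (l.count p.1 : Int))).items =
            r.items ++ [(p.1, p.2 - (l.count p.1 : Int))] :=
          PySem.Dict.items_insert_of_not_contains r _ (by simp [hpc])
        have hf : pvF l p = some (p.1, p.2 - (l.count p.1 : Int)) := by
          simp [pvF, h1]
        rw [if_neg h0, if_pos h1, ih _ hnd.2 (hfresh' _), hins, List.filterMap_cons_some hf,
          List.append_assoc, List.singleton_append]
      · have h0' : l.count p.1 ≠ 0 := by exact_mod_cast h0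
        have hf : pvF l p = none := by
          simp [pvF, h0', h1]
        rw [if_neg h0, if_neg h1, ih _ hnd.2 htail, List.filterMap_cons_none hf]

-- ===== VERDICT (by name: the statement is the Claim_ definition above) =====
theorem remove_from_inventory_spec : Claim_equal_remove_from_inventory := by
  intro inventory removed_items _hdom hpre
  unfold Spec_remove_from_inventory remove_from_inventory remove_from_inventory_alt
  have hstep : (fun (result : PySem.Dict String Int) (p : String × Int) =>
      let taken : Int := (removed_items.foldl (fun d item => d.modify item 0 (· + 1))
          PySem.Dict.empty).getD p.1 0
      if taken = 0 then result.insert p.1 p.2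
      else if 1 ≤ p.2 - taken then result.insert p.1 (p.2 - taken)
      else result) = (fun result p =>
      let taken : Int := removed_items.count p.1
      if taken = 0 then result.insert p.1 p.2
      else if 1 ≤ p.2 - taken then result.insert p.1 (p.2 - taken)
      else result) := by
    funext result p
    rw [PySem.Dict.getD_foldl_modify_add_one, PySem.Dict.getD_empty, zero_add]
  rw [pv_foldA removed_items _ hpre]
  show _ = (inventory.foldl _ PySem.Dict.empty).items
  rw [hstep,
    pv_foldB removed_items inventory PySem.Dict.empty hpre
      (fun q _ => PySem.Dict.contains_empty q.1)]
  simp [PySem.Dict.empty]
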